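-- pv_equiv track=rewrite | github.com/Kim-Minhee/Baekjoon | 백준/Bronze/2484. 주사위 네개/주사위 네개.py | reward
-- ===== SOURCE A (Python) =====
-- def reward(lst):
--   d = dict()
--   for i in lst:
--     if i not in d.keys():
--       d[i] = 1
--     else:
--       d[i] += 1
--   l = len(d.keys())
--   if l==4:
--     r = max(d.keys())*100
--   elif l==3:
--     for k, v in d.items():
--       if v==2:
--         r = 1000+k*100
--         break
--   elif l==2:
--     if 2 in d.values():
--       r = 2000+(sum(d.keys()))*500
--     else:
--       for k, v in d.items():
--         if v==3:
--           r = 10000+k*1000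
--           break
--   else:
--     r = 50000+list(d.keys())[0]*5000
--   return r
-- ===== SOURCE B (Python) =====
-- def reward(lst):
--   s = sorted(lst)
--   runs = []                      # (value, run length) over the sorted list
--   i = 0
--   n = len(s)
--   while i < n:
--     j = i
--     while j < n and s[j] == s[i]:
--       j += 1
--     runs.append((s[i], j - i))
--     i = j
--   if len(runs) == 4:
--     return runs[-1][0] * 100
--   if len(runs) == 3:
--     return 1000 + next(v for v, c in runs if c == 2) * 100
--   if len(runs) == 2:
--     if 2 in (c for _, c in runs):
--       return 2000 + (runs[0][0] + runs[1][0]) * 500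
--     return 10000 + next(v for v, c in runs if c == 3) * 1000
--   return 50000 + lst[0] * 5000
-- ===== Notes on version B (the rewrite author's own statement) =====
-- stated objective: alternative
-- what changed: B sorts the list and run-length-encodes it, classifying the hand from the runs of the sorted order (last run = max, run of length 2/3 = the doubled/tripled value), instead of A's incrementally built frequency dict and its scans over dict keys/values/items.
-- outside the precondition, e.g. on reward([2, 2, 1, 1, 3]): A returns 1200, B returns 1100; on reward([2, 2, 2, 1, 1, 1]): A returns 12000, B returns 11000
import Mathlib
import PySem

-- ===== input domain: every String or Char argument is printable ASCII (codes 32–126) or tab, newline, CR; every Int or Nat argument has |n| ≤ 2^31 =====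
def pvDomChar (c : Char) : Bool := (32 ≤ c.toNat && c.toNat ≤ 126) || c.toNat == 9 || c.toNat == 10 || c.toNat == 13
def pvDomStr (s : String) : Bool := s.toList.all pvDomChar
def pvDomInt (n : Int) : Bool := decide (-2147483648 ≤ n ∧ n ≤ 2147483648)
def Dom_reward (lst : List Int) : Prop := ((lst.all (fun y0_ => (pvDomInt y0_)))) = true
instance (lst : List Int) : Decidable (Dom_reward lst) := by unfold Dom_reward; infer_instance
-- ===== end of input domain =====

-- B sorts the list and run-length-encodes it, classifying the hand from the runs of the
-- sorted order instead of A's frequency dict and its scans over dict keys/values/items.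

-- ===== PORT A =====
def reward (lst : List Int) : Int :=
  let d : PySem.Dict Int Int :=
    lst.foldl (fun d i =>
      if d.contains i then d.insert i (d.getD i 0 + 1)   -- d[i] += 1 (key present)
      else d.insert i 1) PySem.Dict.empty
  let l := d.keys.length
  if l == 4 then
    ((PySem.List.max? d.keys (fun x => x)).getD 0) * 100 -- keys nonempty here, getD unreachable
  else if l == 3 then
    match d.items.find? (fun kv => kv.2 == 2) with       -- 'for k,v: if v==2: r=…; break'
    | some kv => 1000 + kv.1 * 100
    | none => 0                                          -- Python: UnboundLocalError; outside Pre_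
  else if l == 2 then
    if d.values.contains 2 then 2000 + d.keys.sum * 500
    else
      match d.items.find? (fun kv => kv.2 == 3) with
      | some kv => 10000 + kv.1 * 1000
      | none => 0                                        -- Python: UnboundLocalError; outside Pre_
  else
    match d.keys with
    | k :: _ => 50000 + k * 5000                         -- list(d.keys())[0]
    | [] => 0                                            -- Python: IndexError on []; outside Pre_

-- ===== PORT B =====
-- inner 'while j < n and s[j] == s[i]: j += 1' : length of the run of a at the front
def runLen (a : Int) : List Int → Int
  | [] => 0
  | b :: t => if b == a then runLen a t + 1 else 0

-- advancing i to j: dropping the run of a at the front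
def dropEq (a : Int) : List Int → List Int
  | [] => []
  | b :: t => if b == a then dropEq a t else b :: t

-- termination of the outer while loop (cited by runs' decreasing_by)
theorem dropEq_length_le (a : Int) : ∀ t : List Int, (dropEq a t).length ≤ t.length := by
  intro t
  induction t with
  | nil => simp [dropEq]
  | cons b t ih =>
    by_cases h : b = a
    · simp only [dropEq, h, BEq.rfl, if_true]
      exact ih.trans (Nat.le_succ _)
    · simp [dropEq, h]

-- outer while loop: the (value, run length) list of the sorted input
def runs : List Int → List (Int × Int)
  | [] => []
  | a :: t => (a, 1 + runLen a t) :: runs (dropEq a t)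
  termination_by s => s.length
  decreasing_by simpa using Nat.lt_succ_of_le (dropEq_length_le a t)

def reward_alt (lst : List Int) : Int :=
  let s := PySem.List.sorted lst (fun x => x) false
  let rs := runs s
  if rs.length == 4 then
    match rs.getLast? with
    | some r => r.1 * 100                                -- runs[-1][0]
    | none => 0                                          -- unreachable (rs has length 4)
  else if rs.length == 3 then
    match rs.find? (fun r => r.2 == 2) with
    | some r => 1000 + r.1 * 100
    | none => 0                                          -- Python: StopIteration; outside Pre_
  else if rs.length == 2 then
    if (rs.map (fun r => r.2)).contains 2 then
      match rs with
      | r0 :: r1 :: _ => 2000 + (r0.1 + r1.1) * 500      -- runs[0][0] + runs[1][0]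
      | _ => 0                                           -- unreachable (rs has length 2)
    else
      match rs.find? (fun r => r.2 == 3) with
      | some r => 10000 + r.1 * 1000
      | none => 0                                        -- Python: StopIteration; outside Pre_
  else
    match PySem.List.pyGet? lst 0 with
    | some v => 50000 + v * 5000
    | none => 0                                          -- Python: IndexError on []; outside Pre_

-- ===== PRECONDITION & SPEC =====
-- Pre_ excludes (a) inputs where A raises: the empty list (IndexError) and inputs with 3
-- distinct values but no doubled one, or 2 distinct values with neither a doubled nor a
-- uniquely tripled one (UnboundLocalError); and (b) a defensible corner on which A returns:
-- inputs where several values are doubled (3 distinct) or several are tripled (2 distinct),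
-- where A's answer depends on the accidental dict insertion order while B takes the smallest.
def Pre_reward (lst : List Int) : Prop :=
  lst ≠ [] ∧
  ((PySem.Set.ofList lst).length = 3 →
      (PySem.Set.ofList lst).countP (fun v => (lst.count v : Int) == 2) = 1) ∧
  ((PySem.Set.ofList lst).length = 2 →
      ((∃ v ∈ lst, lst.count v = 2) ∨
        (PySem.Set.ofList lst).countP (fun v => (lst.count v : Int) == 3) = 1))
instance (lst : List Int) : Decidable (Pre_reward lst) := by unfold Pre_reward; infer_instance
def pvWitness_reward : List Int := [3, 1, 3, 6]
def Spec_reward (lst : List Int) (out : Int) : Prop := out = reward_alt lst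
instance (lst : List Int) (out : Int) : Decidable (Spec_reward lst out) := by unfold Spec_reward; infer_instance

-- ===== CLAIM (what is proved, stated in full; the proofs are below) =====
def Claim_equal_reward : Prop := ∀ (lst : List Int), Dom_reward lst → Pre_reward lst → Spec_reward lst (reward lst)

-- ===== LEMMAS AND PROOFS =====

-- A's counting loop is collections.Counter
theorem foldl_eq_counter (xs : List Int) :
    xs.foldl (fun d i => if d.contains i then d.insert i (d.getD i 0 + 1) else d.insert i 1)
      PySem.Dict.empty = PySem.Dict.counter xs := by
  rw [← PySem.Dict.foldl_insert_getD_add_one_eq_counter]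
  congr 1
  funext d i
  by_cases h : d.contains i
  · simp [h]
  · simp [h, PySem.Dict.getD_of_not_contains d 0 (by simpa using h)]

-- dedup keeps first occurrences: pulling the head out of Set.ofList
theorem foldl_add_cons (x : Int) : ∀ (xs acc : List Int),
    xs.foldl PySem.Set.add (x :: acc.filter (fun y => !(y == x))) =
      x :: (xs.foldl PySem.Set.add acc).filter (fun y => !(y == x)) := by
  intro xs
  induction xs with
  | nil => intro acc; rfl
  | cons a t ih =>
    intro acc
    by_cases hax : a = x
    · subst hax
      have h1 : PySem.Set.add (a :: acc.filter (fun y => !(y == a))) a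
          = a :: acc.filter (fun y => !(y == a)) := by
        simp [PySem.Set.add]
      have h2 : (PySem.Set.add acc a).filter (fun y => !(y == a)) =
          acc.filter (fun y => !(y == a)) := by
        by_cases hm : a ∈ acc <;> simp [PySem.Set.add, hm]
      rw [List.foldl_cons, List.foldl_cons, h1, ← ih (PySem.Set.add acc a), h2]
    · by_cases hm : a ∈ acc
      · have h1 : PySem.Set.add (x :: acc.filter (fun y => !(y == x))) a
            = x :: acc.filter (fun y => !(y == x)) := by
          simp [PySem.Set.add, List.mem_filter, hm, hax]
        have h2 : PySem.Set.add acc a = acc := by simp [PySem.Set.add, hm]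
        rw [List.foldl_cons, List.foldl_cons, h1, h2]
        exact ih acc
      · have h1 : PySem.Set.add (x :: acc.filter (fun y => !(y == x))) a
            = x :: (acc.filter (fun y => !(y == x)) ++ [a]) := by
          simp [PySem.Set.add, List.mem_filter, hm, hax]
        have h2 : PySem.Set.add acc a = acc ++ [a] := by simp [PySem.Set.add, hm]
        have h3 : (acc ++ [a]).filter (fun y => !(y == x)) =
            acc.filter (fun y => !(y == x)) ++ [a] := by
          simp [List.filter_append, hax]
        rw [List.foldl_cons, List.foldl_cons, h1, h2, ← h3]
        exact ih (acc ++ [a])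

theorem ofList_cons (x : Int) (xs : List Int) :
    PySem.Set.ofList (x :: xs) =
      x :: (PySem.Set.ofList xs).filter (fun y => !(y == x)) := by
  have h0 : PySem.Set.ofList (x :: xs) = xs.foldl PySem.Set.add (PySem.Set.add [] x) := rfl
  have h1 : PySem.Set.add ([] : List Int) x = x :: (List.filter (fun y => !(y == x)) []) := by
    simp [PySem.Set.add]
  rw [h0, h1, foldl_add_cons]
  rfl

-- dedup commutes with filter
theorem ofList_filter (p : Int → Bool) : ∀ xs : List Int,
    PySem.Set.ofList (xs.filter p) = (PySem.Set.ofList xs).filter p := by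
  intro xs
  induction xs with
  | nil => rfl
  | cons x t ih =>
    by_cases hx : p x
    · rw [List.filter_cons_of_pos hx, ofList_cons, ofList_cons, ih,
        List.filter_cons_of_pos hx, List.filter_comm]
    · rw [List.filter_cons_of_neg (by simpa using hx), ofList_cons, ih,
        List.filter_cons_of_neg (by simpa using hx), List.filter_filter]
      apply List.filter_congr
      intro y hy
      by_cases hyx : y = x
      · subst hyx; simp [hx]
      · simp [hyx]

-- distinct values of a ≤-sorted list are strictly increasing
theorem pairwise_lt_ofList : ∀ {s : List Int},
    s.Pairwise (fun a b => a ≤ b) → (PySem.Set.ofList s).Pairwise (· < ·) := by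
  intro s
  induction s with
  | nil => intro _; exact List.Pairwise.nil
  | cons a t ih =>
    intro hp
    rw [ofList_cons]
    refine List.pairwise_cons.mpr ⟨?_, ((ih hp.tail).filter _)⟩
    intro y hy
    have hyt : y ∈ t := (PySem.Set.mem_ofList t y).mp (List.mem_of_mem_filter hy)
    have hya : ¬(y = a) := by simpa using List.of_mem_filter hy
    have hle : a ≤ y := List.rel_of_pairwise_cons hp hyt
    exact lt_of_le_of_ne hle (fun h => hya h.symm)

-- on a sorted list, the run of the head covers all its occurrences
theorem runLen_sorted : ∀ {a : Int} {t : List Int},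
    (a :: t).Pairwise (fun x y => x ≤ y) → runLen a t = (t.count a : Int) := by
  intro a t
  induction t with
  | nil => intro _; simp [runLen]
  | cons b t' ih =>
    intro hp
    by_cases hba : b = a
    · subst hba
      have hp' : (b :: t').Pairwise (fun x y : Int => x ≤ y) := hp.tail
      rw [show runLen b (b :: t') = runLen b t' + 1 by simp [runLen]]
      rw [ih hp']
      simp
    · have hnone : t'.count a = 0 := by
        rw [List.count_eq_zero]
        intro ha
        have h1 : a ≤ b := List.rel_of_pairwise_cons hp (by simp)
        have h2 : b ≤ a := List.rel_of_pairwise_cons hp.tail ha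
        exact hba (le_antisymm h2 h1)
      rw [show runLen a (b :: t') = 0 by simp [runLen, hba]]
      simp [hnone, hba]

theorem dropEq_sorted : ∀ {a : Int} {t : List Int},
    (a :: t).Pairwise (fun x y => x ≤ y) → dropEq a t = t.filter (fun b => !(b == a)) := by
  intro a t
  induction t with
  | nil => intro _; rfl
  | cons b t' ih =>
    intro hp
    by_cases hba : b = a
    · subst hba
      have hp' : (b :: t').Pairwise (fun x y : Int => x ≤ y) := hp.tail
      rw [show dropEq b (b :: t') = dropEq b t' by simp [dropEq]]
      rw [ih hp']
      simp
    · rw [show dropEq a (b :: t') = b :: t' by simp [dropEq, hba]]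
      rw [List.filter_cons_of_pos (by simpa using hba)]
      rw [List.filter_eq_self.mpr]
      intro c hc
      have h1 : a ≤ b := List.rel_of_pairwise_cons hp (by simp)
      have h2 : b ≤ c := List.rel_of_pairwise_cons hp.tail hc
      have hca : c ≠ a := fun hca => hba (le_antisymm (hca ▸ h2) h1)
      simpa using hca

-- the runs of a sorted list are its distinct values paired with their multiplicities
theorem runs_sorted : ∀ s : List Int, s.Pairwise (fun a b => a ≤ b) →
    runs s = (PySem.Set.ofList s).map (fun v => (v, (s.count v : Int))) := by
  intro s
  induction s using runs.induct with
  | case1 => intro _; simp [runs]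
  | case2 a t ih =>
    intro hp
    have hfilter : dropEq a t = t.filter (fun b => !(b == a)) := dropEq_sorted hp
    have hih := ih (by rw [hfilter]; exact hp.tail.filter _)
    rw [hfilter] at hih
    simp only [runs]
    rw [hfilter, hih, ofList_cons, ofList_filter]
    rw [List.map_cons]
    congr 1
    · have : runLen a t = (t.count a : Int) := runLen_sorted hp
      rw [this]
      congr 1
      rw [List.count_cons_self]
      push_cast
      ring
    · apply List.map_congr_left
      intro y hy
      have hya : ¬(y = a) := by simpa using List.of_mem_filter hy
      have h1 : (t.filter (fun b => !(b == a))).count y = t.count y :=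
        List.count_filter (by simpa using hya)
      rw [h1]
      simp [Ne.symm hya]

-- first element satisfying p is determined when only one element satisfies p
theorem find?_unique {p : Int → Bool} {x : Int} : ∀ {K : List Int},
    x ∈ K → p x = true → (∀ y ∈ K, p y = true → y = x) → K.find? p = some x := by
  intro K
  induction K with
  | nil => intro h; cases h
  | cons a t ih =>
    intro hx hpx huniq
    rw [List.find?_cons]
    cases hpa : p a with
    | true => rw [huniq a (by simp) hpa]
    | false =>
      have hxt : x ∈ t := by
        rcases List.mem_cons.mp hx with h | h
        · rw [← h] at hpa; rw [hpx] at hpa; cases hpa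
        · exact h
      exact ih hxt hpx (fun y hy hpy => huniq y (List.mem_cons_of_mem _ hy) hpy)

-- a list in which exactly one element satisfies p
theorem countP_one_unique {p : Int → Bool} {K : List Int} (h : K.countP p = 1) :
    ∃ x ∈ K, p x = true ∧ ∀ y ∈ K, p y = true → y = x := by
  rw [List.countP_eq_length_filter] at h
  obtain ⟨x, hx⟩ := List.length_eq_one_iff.mp h
  refine ⟨x, (List.mem_filter.mp (hx ▸ List.mem_singleton_self x)).1,
    (List.mem_filter.mp (hx ▸ List.mem_singleton_self x)).2, ?_⟩
  intro y hy hpy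
  have : y ∈ K.filter p := List.mem_filter.mpr ⟨hy, hpy⟩
  rw [hx] at this
  simpa using this

-- the last element of a ≤-sorted list bounds every element
theorem getLast?_max : ∀ {l : List Int}, l.Pairwise (fun a b => a ≤ b) →
    ∀ y ∈ l, ∃ z, l.getLast? = some z ∧ y ≤ z ∧ z ∈ l := by
  intro l
  induction l with
  | nil => intro _ y hy; cases hy
  | cons a t ih =>
    intro hp y hy
    cases t with
    | nil =>
      refine ⟨a, rfl, ?_, by simp⟩
      rcases List.mem_cons.mp hy with h | h
      · exact le_of_eq h
      · cases h
    | cons b t' =>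
      obtain ⟨z, hz1, hz2, hz3⟩ := ih hp.tail b (by simp)
      rcases List.mem_cons.mp hy with h | h
      · exact ⟨z, by rw [List.getLast?_cons_cons]; exact hz1,
          (h ▸ List.rel_of_pairwise_cons hp (by simp)).trans hz2,
          List.mem_cons_of_mem _ hz3⟩
      · obtain ⟨z', hz1', hz2', hz3'⟩ := ih hp.tail y h
        exact ⟨z', by rw [List.getLast?_cons_cons]; exact hz1',
          hz2', List.mem_cons_of_mem _ hz3'⟩

theorem reward_eq_alt (lst : List Int) (hpre : Pre_reward lst) :
    reward lst = reward_alt lst := by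
  obtain ⟨hne, hp3, hp2⟩ := hpre
  have hsp : (PySem.List.sorted lst (fun x => x) false).Pairwise (fun a b : Int => a ≤ b) :=
    PySem.List.sorted_pairwise lst (fun x : Int => x)
  have hperm : (PySem.List.sorted lst (fun x => x) false).Perm lst :=
    PySem.List.sorted_perm lst (fun x : Int => x) false
  have hcount : ∀ v : Int, (PySem.List.sorted lst (fun x => x) false).count v = lst.count v :=
    fun v => hperm.count_eq v
  have hruns : runs (PySem.List.sorted lst (fun x => x) false) =
      (PySem.Set.ofList (PySem.List.sorted lst (fun x => x) false)).map
        (fun v => (v, (lst.count v : Int))) := by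
    rw [runs_sorted _ hsp]
    exact List.map_congr_left (fun v _ => by rw [hcount v])
  have hKsmem : ∀ q : Int, q ∈ PySem.Set.ofList (PySem.List.sorted lst (fun x => x) false) ↔
      q ∈ PySem.Set.ofList lst := fun q => by
    rw [PySem.Set.mem_ofList, PySem.Set.mem_ofList, hperm.mem_iff]
  have hKperm : (PySem.Set.ofList (PySem.List.sorted lst (fun x => x) false)).Perm
      (PySem.Set.ofList lst) :=
    (List.perm_ext_iff_of_nodup (PySem.Set.nodup_ofList _) (PySem.Set.nodup_ofList _)).mpr
      hKsmem
  have hKslt : (PySem.Set.ofList (PySem.List.sorted lst (fun x => x) false)).Pairwise (· < ·) :=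
    pairwise_lt_ofList hsp
  have hlen : (PySem.Set.ofList (PySem.List.sorted lst (fun x => x) false)).length =
      (PySem.Set.ofList lst).length := hKperm.length_eq
  -- canonical forms of both sides
  simp only [reward, reward_alt, foldl_eq_counter, PySem.Dict.keys_counter,
    PySem.Dict.items_counter, PySem.Dict.values, hruns, List.length_map, hlen,
    List.find?_map, List.map_map, List.getLast?_map, Function.comp_def]
  by_cases h4 : (PySem.Set.ofList lst).length = 4
  · -- four distinct values: A takes max(keys), B the last run
    rw [h4]
    norm_num
    obtain ⟨m, hm⟩ : ∃ m, PySem.List.max? (PySem.Set.ofList lst) (fun x => x) = some m := by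
      cases hmq : PySem.List.max? (PySem.Set.ofList lst) (fun x => x) with
      | none =>
        rw [PySem.List.max?_eq_none_iff] at hmq
        rw [hmq] at h4; simp at h4
      | some m => exact ⟨m, rfl⟩
    obtain ⟨z, hz1, hz2, hz3⟩ := getLast?_max (hKslt.imp (fun h => le_of_lt h))
      m ((hKsmem m).mpr (PySem.List.max?_mem hm))
    have hzm : z = m := le_antisymm (PySem.List.max?_isMax hm z ((hKsmem z).mp hz3)) hz2
    rw [hz1, hzm, hm]
    rfl
  · by_cases h3 : (PySem.Set.ofList lst).length = 3
    · -- three distinct values: exactly one doubled value (Pre_), both sides find it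
      rw [h3]
      norm_num [h4]
      obtain ⟨x, hxK, hpx, huniq⟩ := countP_one_unique (hp3 h3)
      rw [find?_unique hxK hpx huniq,
        find?_unique ((hKsmem x).mpr hxK) hpx
          (fun y hy hpy => huniq y ((hKsmem y).mp hy) hpy)]
    · by_cases h2 : (PySem.Set.ofList lst).length = 2
      · -- two distinct values
        rw [h2]
        norm_num [h4, h3]
        by_cases hcv : ∃ a ∈ lst, ((lst.count a : Int)) = 2
        · -- two pairs: A sums the keys, B the two run values
          rw [if_pos hcv, if_pos hcv]
          obtain ⟨k0, k1, hKs⟩ := List.length_eq_two.mp (hlen.trans h2)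
          have hsum : (PySem.Set.ofList lst).sum = k0 + k1 := by
            rw [← hKperm.sum_eq, hKs]; simp
          rw [hKs, hsum]
          simp
        · -- a triple: exactly one tripled value (Pre_), both sides find it
          rw [if_neg hcv, if_neg hcv]
          have hno2 : ¬ ∃ v ∈ lst, lst.count v = 2 := by
            intro ⟨v, hv, hcv2⟩
            exact hcv ⟨v, hv, by rw [hcv2]; rfl⟩
          obtain ⟨x, hxK, hpx, huniq⟩ := countP_one_unique ((hp2 h2).resolve_left hno2)
          rw [find?_unique hxK hpx huniq,
            find?_unique ((hKsmem x).mpr hxK) hpx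
              (fun y hy hpy => huniq y ((hKsmem y).mp hy) hpy)]
      · -- one distinct value, or five and more: first key = first element
        norm_num [h4, h3, h2]
        match hl : lst, hne with
        | h :: t, _ =>
          rw [ofList_cons]
          simp [PySem.List.pyGet?, PySem.List.pyIdx?]

-- ===== VERDICT (by name: the statement is the Claim_ definition above) =====
theorem reward_spec : Claim_equal_reward := by
  intro lst _ hpre
  unfold Spec_reward
  exact reward_eq_alt lst hpre
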